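-- pv_equiv track=rewrite | github.com/Pat9801356463/hdfc-banking-chatbot | app/utils/intent_mapper.py | parse_intent_usecase_response
-- ===== SOURCE A (Python) =====
-- def parse_intent_usecase_response(response_text):
--     lines = response_text.strip().splitlines()
--     intent = use_case = None
--
--     for line in lines:
--         if line.lower().startswith("intent:"):
--             intent = line.split(":", 1)[1].strip()
--         elif line.lower().startswith("use case:"):
--             use_case = line.split(":", 1)[1].strip()
--
--     return {
--         "intent": intent or "unknown",
--         "use_case": use_case or "unknown"
--     }
-- ===== SOURCE B (Python) =====
-- def parse_intent_usecase_response(response_text):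
--     fields = {}
--     for line in response_text.strip().splitlines():
--         if ":" in line:
--             key, value = line.split(":", 1)
--             fields[key.lower()] = value.strip()
--     return {
--         "intent": fields.get("intent") or "unknown",
--         "use_case": fields.get("use case") or "unknown"
--     }
-- ===== Notes on version B (the rewrite author's own statement) =====
-- stated objective: simpler
-- what changed: Replaces A's two scalar accumulators with hard-coded per-key prefix tests by a generic one-pass key:value index (split each line at its first colon into a dict), followed by two lookups.
import Mathlib
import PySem

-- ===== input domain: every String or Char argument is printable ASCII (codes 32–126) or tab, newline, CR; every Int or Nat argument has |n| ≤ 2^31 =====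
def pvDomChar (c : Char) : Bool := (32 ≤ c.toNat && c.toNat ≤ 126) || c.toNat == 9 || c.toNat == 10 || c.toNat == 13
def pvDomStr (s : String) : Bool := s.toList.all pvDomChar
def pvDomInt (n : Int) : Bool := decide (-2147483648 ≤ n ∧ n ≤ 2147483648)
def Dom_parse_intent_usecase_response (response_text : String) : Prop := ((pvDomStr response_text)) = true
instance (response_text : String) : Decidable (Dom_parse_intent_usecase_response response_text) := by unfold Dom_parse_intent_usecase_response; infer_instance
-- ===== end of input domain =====

-- B replaces A's two scalar accumulators and per-key prefix tests by one generic key:value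
-- index built in a single pass, then two lookups (objective: simpler/more idiomatic).

-- `x or "unknown"` for x : Optional[str] (None and "" are falsy) — shared by both ports
def pvOrUnknown (v : Option String) : String :=
  match v with
  | none => "unknown"
  | some s => if s = "" then "unknown" else s

-- ===== PORT A =====
-- `line.split(":", 1)[1]` is ported as `.getD 1 ""`; the default is unreachable because each
-- branch's startswith guard guarantees a ':' in the line, so split returns two pieces.
def parse_intent_usecase_response (response_text : String) : List (String × String) :=
  let lines := PySem.Str.splitlines (PySem.Str.strip response_text)
  let st := lines.foldl (fun (st : Option String × Option String) line =>
      if PySem.Str.startswith (PySem.Str.lower line) "intent:" then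
        (some (PySem.Str.strip (((PySem.Str.splitMax? line ":" 1).getD []).getD 1 "")), st.2)
      else if PySem.Str.startswith (PySem.Str.lower line) "use case:" then
        (st.1, some (PySem.Str.strip (((PySem.Str.splitMax? line ":" 1).getD []).getD 1 "")))
      else st) (none, none)
  [("intent", pvOrUnknown st.1), ("use_case", pvOrUnknown st.2)]

-- ===== PORT B =====
-- `key, value = line.split(":", 1)` is ported via `.getD`; the defaults are unreachable
-- because the `":" in line` guard guarantees split returns exactly two pieces.
def parse_intent_usecase_response_alt (response_text : String) : List (String × String) :=
  let fields := (PySem.Str.splitlines (PySem.Str.strip response_text)).foldl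
      (fun (d : PySem.Dict String String) line =>
        if PySem.Str.isIn ":" line then
          let parts := (PySem.Str.splitMax? line ":" 1).getD []
          d.insert (PySem.Str.lower (parts.getD 0 "")) (PySem.Str.strip (parts.getD 1 ""))
        else d) PySem.Dict.empty
  [("intent", pvOrUnknown (fields.get? "intent")),
   ("use_case", pvOrUnknown (fields.get? "use case"))]

-- ===== PRECONDITION & SPEC =====
def Spec_parse_intent_usecase_response (response_text : String) (out : List (String × String)) : Prop := out = parse_intent_usecase_response_alt response_text
instance (response_text : String) (out : List (String × String)) : Decidable (Spec_parse_intent_usecase_response response_text out) := by unfold Spec_parse_intent_usecase_response; infer_instance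

-- ===== CLAIM (what is proved, stated in full; the proofs are below) =====
def Claim_equal_parse_intent_usecase_response : Prop := ∀ (response_text : String), Dom_parse_intent_usecase_response response_text → Spec_parse_intent_usecase_response response_text (parse_intent_usecase_response response_text)

-- ===== LEMMAS AND PROOFS =====

-- splitOnMax.go with maxsplit exhausted just flushes the rest of the string
lemma pv_go_zero (sep : List Char) (fuel : Nat) (l cur : List Char) (acc : List (List Char)) :
    PySem.Chars.splitOnMax.go sep fuel 0 l cur acc = acc.reverse ++ [cur.reverse ++ l] := by
  cases fuel <;> cases l <;> simp [PySem.Chars.splitOnMax.go]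

-- splitOnMax.go on [':'] with maxsplit 1: split at the first ':' if any
lemma pv_go_one (l : List Char) (fuel : Nat) (cur : List Char) (acc : List (List Char))
    (hf : l.length < fuel) :
    PySem.Chars.splitOnMax.go [':'] fuel 1 l cur acc =
      acc.reverse ++ (if ':' ∈ l
        then [cur.reverse ++ l.takeWhile (· ≠ ':'), (l.dropWhile (· ≠ ':')).tail]
        else [cur.reverse ++ l]) := by
  induction l generalizing fuel cur acc with
  | nil =>
      cases fuel with
      | zero => omega
      | succ n => simp [PySem.Chars.splitOnMax.go]
  | cons c rest ih =>
      cases fuel with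
      | zero => omega
      | succ n =>
        by_cases hc : c = ':'
        · subst hc
          simp only [PySem.Chars.splitOnMax.go, List.isPrefixOf, BEq.rfl, Bool.true_and,
            if_true, if_neg (by omega : ¬ (1 : Nat) = 0)]
          rw [pv_go_zero]
          simp
        · have hbeq : ((':' : Char) == c) = false := beq_eq_false_iff_ne.mpr (Ne.symm hc)
          have hpre : List.isPrefixOf [':'] (c :: rest) = false := by
            simp [List.isPrefixOf, hbeq]
          simp only [PySem.Chars.splitOnMax.go, hpre, if_neg (by omega : ¬ (1 : Nat) = 0),
            Bool.false_eq_true, if_false]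
          rw [ih n (c :: cur) acc (by simpa using Nat.lt_of_succ_lt_succ hf)]
          have hm : (':' ∈ c :: rest) = (':' ∈ rest) := by
            simp only [List.mem_cons]
            exact propext (or_iff_right (fun h => hc (Eq.symm h)))
          simp [hc, hm]

-- characterisation of s.split(":", 1) at the char level
lemma pv_splitOnMax_colon (cs : List Char) :
    PySem.Chars.splitOnMax cs [':'] 1 =
      if ':' ∈ cs then [cs.takeWhile (· ≠ ':'), (cs.dropWhile (· ≠ ':')).tail] else [cs] := by
  unfold PySem.Chars.splitOnMax
  rw [if_neg (by omega : ¬ (1 : Int) < 0)]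
  rw [show (1 : Int).toNat = 1 from rfl]
  rw [pv_go_one cs (cs.length + 1) [] [] (by omega)]
  simp

lemma pv_lowerChar_ne_colon (c : Char) (h : c ≠ ':') : PySem.Chars.lowerChar c ≠ ':' := by
  unfold PySem.Chars.lowerChar
  split
  · rename_i hu
    simp only [PySem.Chars.isupper, Bool.and_eq_true, decide_eq_true_eq] at hu
    have h1 : 65 ≤ c.toNat := hu.1
    have h2 : c.toNat ≤ 90 := hu.2
    intro he
    have h3 : (Char.ofNat (c.toNat + 32)).toNat = (':' : Char).toNat := by rw [he]
    have hv : (c.toNat + 32).isValidChar := Or.inl (by omega)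
    rw [Char.toNat_ofNat] at h3
    rw [if_pos hv] at h3
    have h4 : (':' : Char).toNat = 58 := rfl
    omega
  · exact h

lemma pv_mem_lower (cs : List Char) : ':' ∈ PySem.Chars.lower cs ↔ ':' ∈ cs := by
  unfold PySem.Chars.lower
  simp only [List.mem_map]
  constructor
  · rintro ⟨c, hc, he⟩
    by_cases h : c = ':'
    · exact h ▸ hc
    · exact absurd he (pv_lowerChar_ne_colon c h)
  · intro h
    exact ⟨':', h, rfl⟩

lemma pv_colon_decomp (cs : List Char) (h : ':' ∈ cs) :
    cs = cs.takeWhile (· ≠ ':') ++ ':' :: (cs.dropWhile (· ≠ ':')).tail := by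
  induction cs with
  | nil => cases h
  | cons c rest ih =>
      by_cases hc : c = ':'
      · subst hc; simp
      · have hr : ':' ∈ rest := by
          rcases List.mem_cons.mp h with h' | h'
          · exact absurd h'.symm hc
          · exact h'
        simp only [List.takeWhile_cons, List.dropWhile_cons]
        simp only [hc, decide_not]
        simpa [hc] using congrArg (c :: ·) (ih hr)

lemma pv_not_mem_takeWhile (cs : List Char) : ':' ∉ cs.takeWhile (· ≠ ':') := by
  intro h
  have := List.mem_takeWhile_imp h
  simp at this

lemma pv_prefix_colon (p : List Char) : ∀ (a b : List Char), ':' ∉ p → ':' ∉ a →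
    ((p ++ [':']) <+: (a ++ ':' :: b) ↔ a = p) := by
  induction p with
  | nil =>
      intro a b _ ha
      constructor
      · intro h
        cases a with
        | nil => rfl
        | cons x a' =>
            have hx : ':' = x := by simpa using h
            exact absurd (List.mem_cons_self) (hx ▸ ha)
      · rintro rfl; simp
  | cons q p' ih =>
      intro a b hp ha
      constructor
      · intro h
        cases a with
        | nil =>
            have hq : q = ':' := by
              have h' : q :: (p' ++ [':']) <+: ':' :: b := by simpa using h
              exact (List.cons_prefix_cons.mp h').1
            exact absurd (List.mem_cons_self) (hq ▸ hp)
        | cons x a' =>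
            have h' : q :: (p' ++ [':']) <+: x :: (a' ++ ':' :: b) := by simpa using h
            obtain ⟨hqx, htail⟩ := List.cons_prefix_cons.mp h' 
            have ha' : ':' ∉ a' := fun hm => ha (List.mem_cons_of_mem _ hm)
            have hp' : ':' ∉ p' := fun hm => hp (List.mem_cons_of_mem _ hm)
            rw [(ih a' b hp' ha').mp htail, hqx]
      · rintro rfl; simp

-- A's guard `line.lower().startswith(w + ":")` holds iff the line has a ':' and the
-- lowered text before its first ':' is exactly w
lemma pv_startswith_key (w cs : List Char) (hw : ':' ∉ w) :
    PySem.Chars.startswith (PySem.Chars.lower cs) (w ++ [':']) = true ↔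
      (':' ∈ cs ∧ PySem.Chars.lower (cs.takeWhile (· ≠ ':')) = w) := by
  unfold PySem.Chars.startswith
  rw [List.isPrefixOf_iff_prefix]
  by_cases h : ':' ∈ cs
  · have hb : ':' ∉ PySem.Chars.lower (cs.takeWhile (· ≠ ':')) := by
      rw [pv_mem_lower]; exact pv_not_mem_takeWhile cs
    constructor
    · intro hpre
      refine ⟨h, ?_⟩
      have hdec := pv_colon_decomp cs h
      rw [show PySem.Chars.lower cs =
            PySem.Chars.lower (cs.takeWhile (· ≠ ':')) ++ ':' ::
              PySem.Chars.lower ((cs.dropWhile (· ≠ ':')).tail) by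
            conv_lhs => rw [hdec]
            simp [PySem.Chars.lower, PySem.Chars.lowerChar, PySem.Chars.isupper]] at hpre
      exact (pv_prefix_colon w _ _ hw hb).mp hpre
    · rintro ⟨-, hkey⟩
      have hdec := pv_colon_decomp cs h
      rw [show PySem.Chars.lower cs =
            PySem.Chars.lower (cs.takeWhile (· ≠ ':')) ++ ':' ::
              PySem.Chars.lower ((cs.dropWhile (· ≠ ':')).tail) by
            conv_lhs => rw [hdec]
            simp [PySem.Chars.lower, PySem.Chars.lowerChar, PySem.Chars.isupper]]
      exact (pv_prefix_colon w _ _ hw hb).mpr hkey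
  · simp only [h, false_and, iff_false]
    intro hpre
    have : ':' ∈ PySem.Chars.lower cs := hpre.subset (by simp)
    exact h ((pv_mem_lower cs).mp this)

-- String-level corollaries for A's two guards and B's membership guard
lemma pv_condA (line : String) :
    PySem.Str.startswith (PySem.Str.lower line) "intent:" = true ↔
      (':' ∈ line.toList ∧
        PySem.Chars.lower (line.toList.takeWhile (· ≠ ':')) = "intent".toList) := by
  have : PySem.Str.startswith (PySem.Str.lower line) "intent:" =
      PySem.Chars.startswith (PySem.Chars.lower line.toList) ("intent".toList ++ [':']) := by
    simp [pysem]
  rw [this]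
  exact pv_startswith_key _ _ (by decide)

lemma pv_condU (line : String) :
    PySem.Str.startswith (PySem.Str.lower line) "use case:" = true ↔
      (':' ∈ line.toList ∧
        PySem.Chars.lower (line.toList.takeWhile (· ≠ ':')) = "use case".toList) := by
  have : PySem.Str.startswith (PySem.Str.lower line) "use case:" =
      PySem.Chars.startswith (PySem.Chars.lower line.toList) ("use case".toList ++ [':']) := by
    simp [pysem]
  rw [this]
  exact pv_startswith_key _ _ (by decide)

lemma pv_condIn (line : String) : PySem.Str.isIn ":" line = true ↔ ':' ∈ line.toList := by
  rw [PySem.Str.isIn_iff_infix]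
  exact List.singleton_infix_iff ':' line.toList

-- s.split(":", 1) at the String level when the line contains a ':'
lemma pv_split_of_mem (line : String) (h : ':' ∈ line.toList) :
    PySem.Str.splitMax? line ":" 1 =
      some [String.ofList (line.toList.takeWhile (· ≠ ':')),
            String.ofList ((line.toList.dropWhile (· ≠ ':')).tail)] := by
  unfold PySem.Str.splitMax? PySem.Chars.splitMax?
  rw [if_neg (by decide)]
  have : (":" : String).toList = [':'] := rfl
  rw [this, pv_splitOnMax_colon, if_pos h]
  rfl

-- the loop invariant: B's dict agrees with A's two accumulators on the two keys of interest
lemma pv_inv (lines : List String) (st : Option String × Option String)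
    (d : PySem.Dict String String)
    (h1 : d.get? "intent" = st.1) (h2 : d.get? "use case" = st.2) :
    (lines.foldl (fun (d : PySem.Dict String String) line =>
        if PySem.Str.isIn ":" line then
          let parts := (PySem.Str.splitMax? line ":" 1).getD []
          d.insert (PySem.Str.lower (parts.getD 0 "")) (PySem.Str.strip (parts.getD 1 ""))
        else d) d).get? "intent" =
      (lines.foldl (fun (st : Option String × Option String) line =>
        if PySem.Str.startswith (PySem.Str.lower line) "intent:" then
          (some (PySem.Str.strip (((PySem.Str.splitMax? line ":" 1).getD []).getD 1 "")), st.2)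
        else if PySem.Str.startswith (PySem.Str.lower line) "use case:" then
          (st.1, some (PySem.Str.strip (((PySem.Str.splitMax? line ":" 1).getD []).getD 1 "")))
        else st) st).1 ∧
    (lines.foldl (fun (d : PySem.Dict String String) line =>
        if PySem.Str.isIn ":" line then
          let parts := (PySem.Str.splitMax? line ":" 1).getD []
          d.insert (PySem.Str.lower (parts.getD 0 "")) (PySem.Str.strip (parts.getD 1 ""))
        else d) d).get? "use case" =
      (lines.foldl (fun (st : Option String × Option String) line =>
        if PySem.Str.startswith (PySem.Str.lower line) "intent:" then
          (some (PySem.Str.strip (((PySem.Str.splitMax? line ":" 1).getD []).getD 1 "")), st.2)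
        else if PySem.Str.startswith (PySem.Str.lower line) "use case:" then
          (st.1, some (PySem.Str.strip (((PySem.Str.splitMax? line ":" 1).getD []).getD 1 "")))
        else st) st).2 := by
  induction lines generalizing st d with
  | nil => exact ⟨h1, h2⟩
  | cons line rest ih =>
      simp only [List.foldl_cons]
      by_cases hc : ':' ∈ line.toList
      · -- the line is split at its first ':'
        have hkeyL : (PySem.Str.lower (String.ofList (line.toList.takeWhile (· ≠ ':')))).toList =
            PySem.Chars.lower (line.toList.takeWhile (· ≠ ':')) := by
          simp [pysem]
        have hin : PySem.Str.isIn ":" line = true := (pv_condIn line).mpr hc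
        rw [hin, if_pos rfl, pv_split_of_mem line hc]
        simp only [Option.getD_some, List.getD_cons_zero, List.getD_cons_succ]
        by_cases hq1 : PySem.Chars.lower (line.toList.takeWhile (· ≠ ':')) = "intent".toList
        · have hA : PySem.Str.startswith (PySem.Str.lower line) "intent:" = true :=
            (pv_condA line).mpr ⟨hc, hq1⟩
          have hkey : PySem.Str.lower (String.ofList (line.toList.takeWhile (· ≠ ':'))) =
              "intent" := String.toList_inj.mp (by rw [hkeyL, hq1])
          rw [hA, if_pos rfl, hkey]
          refine ih _ _ ?_ ?_
          · rw [PySem.Dict.get?_insert_self]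
          · rw [PySem.Dict.get?_insert_of_ne _ _ (by decide)]
            exact h2
        · have hA : PySem.Str.startswith (PySem.Str.lower line) "intent:" = false := by
            rw [Bool.eq_false_iff]
            intro h
            exact hq1 ((pv_condA line).mp h).2
          by_cases hq2 : PySem.Chars.lower (line.toList.takeWhile (· ≠ ':')) = "use case".toList
          · have hU : PySem.Str.startswith (PySem.Str.lower line) "use case:" = true :=
              (pv_condU line).mpr ⟨hc, hq2⟩
            have hkey : PySem.Str.lower (String.ofList (line.toList.takeWhile (· ≠ ':'))) =
                "use case" := String.toList_inj.mp (by rw [hkeyL, hq2])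
            rw [hA, if_neg Bool.false_ne_true, hU, if_pos rfl, hkey]
            refine ih _ _ ?_ ?_
            · rw [PySem.Dict.get?_insert_of_ne _ _ (by decide)]
              exact h1
            · rw [PySem.Dict.get?_insert_self]
          · have hU : PySem.Str.startswith (PySem.Str.lower line) "use case:" = false := by
              rw [Bool.eq_false_iff]
              intro h
              exact hq2 ((pv_condU line).mp h).2
            rw [hA, if_neg Bool.false_ne_true, hU, if_neg Bool.false_ne_true]
            refine ih _ _ ?_ ?_
            · rw [PySem.Dict.get?_insert_of_ne _ _ ?_]
              · exact h1
              · intro h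
                exact hq1 (by rw [← hkeyL, h])
            · rw [PySem.Dict.get?_insert_of_ne _ _ ?_]
              · exact h2
              · intro h
                exact hq2 (by rw [← hkeyL, h])
      · -- no ':' in the line: neither side touches its state
        have hin : PySem.Str.isIn ":" line = false := by
          rw [Bool.eq_false_iff]
          intro h
          exact hc ((pv_condIn line).mp h)
        have hA : PySem.Str.startswith (PySem.Str.lower line) "intent:" = false := by
          rw [Bool.eq_false_iff]
          intro h
          exact hc ((pv_condA line).mp h).1
        have hU : PySem.Str.startswith (PySem.Str.lower line) "use case:" = false := by
          rw [Bool.eq_false_iff]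
          intro h
          exact hc ((pv_condU line).mp h).1
        rw [hin, if_neg Bool.false_ne_true, hA, if_neg Bool.false_ne_true, hU,
          if_neg Bool.false_ne_true]
        exact ih st d h1 h2

-- ===== VERDICT (by name: the statement is the Claim_ definition above) =====
theorem parse_intent_usecase_response_spec : Claim_equal_parse_intent_usecase_response := by
  intro s _
  unfold Spec_parse_intent_usecase_response
  unfold parse_intent_usecase_response parse_intent_usecase_response_alt
  obtain ⟨h1, h2⟩ := pv_inv (PySem.Str.splitlines (PySem.Str.strip s)) (none, none)
    PySem.Dict.empty (by simp [pysem]) (by simp [pysem])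
  simp only []
  rw [← h1, ← h2]
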